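-- pv_equiv track=rewrite | github.com/jjohnson-99/312-avoiding-rl | python-models/src/helper_functions.py | new_point_allowed
-- ===== SOURCE A (Python) =====
-- def new_point_allowed(one_indices, new_point_index, n):
--     row = new_point_index//n
--     col = new_point_index%n
--     point_allowed = True
--
--     for i in range(len(one_indices)):
--         for j in range(i+1, len(one_indices)):
--             point_one_row = one_indices[i] // n
--             point_one_col = one_indices[i] % n
--             point_two_row = one_indices[j] // n
--             point_two_col = one_indices[j] % n
--
--             if (   row == point_one_row
--                 or row == point_two_row
--                 or point_one_row == point_two_row
--                 or col == point_one_col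
--                 or col == point_two_col
--                 or point_one_col == point_two_col
--             ):
--                 continue
--
--             # ensure point_one_col < point_two_col
--             if point_two_col < point_one_col:
--                 point_one_row, point_two_row = point_two_row, point_one_row
--                 point_one_col, point_two_col = point_two_col, point_one_col
--
--             # new point as 1 in a valid 312-pattern
--             if (point_two_row < point_one_row < row and point_one_col < col < point_two_col):
--                 point_allowed = False
--                 break
--
--             # new point as 2 in a valid 312-pattern
--             if (point_two_row < row < point_one_row and col < point_one_col):
--                 point_allowed = False
--                 break
--
--             # new point as 3 in a valid 312-pattern
--             if (row < point_one_row < point_two_row and point_two_col < col):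
--                 point_allowed = False
--                 break
--
--         if point_allowed == False:
--             break
--
--     return point_allowed
-- ===== SOURCE B (Python) =====
-- def new_point_allowed(one_indices, new_point_index, n):
--     # One-pass extrema for two of the three 312 cases, sort + prefix-min scan for the third: O(k log k) vs A's O(k^2).
--     row, col = divmod(new_point_index, n)
--     pts = [divmod(v, n) for v in one_indices]
--
--     # new point as "1": need a left point a (c_a < col, r_a < row) and a right point b with r_b < r_a
--     right_rows = [r for r, c in pts if c > col]
--     if right_rows:
--         m = min(right_rows)
--         if any(c < col and m < r < row for r, c in pts):
--             return False
--
--     # new point as "2": need b right of col with r_b < row and a with col < c_a < c_b, r_a > row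
--     above_right_cols = [c for r, c in pts if c > col and r > row]
--     if above_right_cols:
--         cm = min(above_right_cols)
--         if any(r < row and c > cm for r, c in pts):
--             return False
--
--     # new point as "3": need pair a, b left of col with c_a < c_b and row < r_a < r_b
--     s = sorted((c, -r) for r, c in pts if c < col and r > row)
--     m = None
--     for c, nr in s:
--         r = -nr
--         if m is not None and m < r:
--             return False
--         m = r if m is None else min(m, r)
--
--     return True
-- ===== Notes on version B (the rewrite author's own statement) =====
-- stated objective: faster
-- what changed: Replaces A's scan over all pairs of points by decomposing the 312 test into three cases, solving two with one-pass row/column minima and the third with a sort by (col, -row) plus a prefix-minimum scan, O(k log k) instead of O(k^2).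
import Mathlib
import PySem

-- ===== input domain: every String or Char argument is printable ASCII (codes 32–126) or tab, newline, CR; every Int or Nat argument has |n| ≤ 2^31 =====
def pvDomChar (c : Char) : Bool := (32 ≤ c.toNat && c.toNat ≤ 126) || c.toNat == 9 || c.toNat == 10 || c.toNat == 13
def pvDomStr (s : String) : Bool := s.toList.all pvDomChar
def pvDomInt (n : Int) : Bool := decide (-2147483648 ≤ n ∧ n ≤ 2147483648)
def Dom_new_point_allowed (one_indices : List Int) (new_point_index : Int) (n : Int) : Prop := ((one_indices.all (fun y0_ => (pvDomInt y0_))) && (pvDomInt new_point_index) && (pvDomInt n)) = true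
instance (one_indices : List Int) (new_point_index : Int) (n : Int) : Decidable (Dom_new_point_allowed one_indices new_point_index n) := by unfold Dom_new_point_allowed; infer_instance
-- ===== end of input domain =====

-- B replaces A's scan over all pairs of points by one-pass row/column extrema for two of the
-- three 312 cases and a sort + prefix-minimum scan for the third (objective: faster, O(k log k) vs O(k^2)).

-- ===== PORT A =====
-- pair test of A's inner-loop body: skip condition, column swap, the three 312 cases
def npaCases (row col ar ac br bc : Int) : Bool :=
  if br < ar && (ar < row && (ac < col && col < bc)) then true          -- new point as 1
  else if br < row && (row < ar && col < ac) then true                  -- new point as 2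
  else if row < ar && (ar < br && bc < col) then true                   -- new point as 3
  else false

-- pair test of A's inner-loop body: skip condition, column swap (done by swapping the
-- arguments of the shared three-case block), the three 312 cases
def npaBadCore (row col r1 c1 r2 c2 : Int) : Bool :=
  if row == r1 || row == r2 || r1 == r2 || col == c1 || col == c2 || c1 == c2 then false
  else if c2 < c1 then npaCases row col r2 c2 r1 c1   -- ensure point_one_col < point_two_col
  else npaCases row col r1 c1 r2 c2

-- inner loop over j > i (break = returning true)
def npaInner (n row col p : Int) : List Int → Bool
  | [] => false
  | q :: rest =>
      if npaBadCore row col (PySem.Int.floordiv p n) (PySem.Int.mod p n)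
                    (PySem.Int.floordiv q n) (PySem.Int.mod q n)
      then true else npaInner n row col p rest

-- outer loop over i (break when the inner loop broke)
def npaOuter (n row col : Int) : List Int → Bool
  | [] => false
  | p :: rest => if npaInner n row col p rest then true else npaOuter n row col rest

def new_point_allowed (one_indices : List Int) (new_point_index : Int) (n : Int) : Bool :=
  let row := PySem.Int.floordiv new_point_index n
  let col := PySem.Int.mod new_point_index n
  !(npaOuter n row col one_indices)

-- ===== PORT B =====
-- new point as "1": minimum row right of col, then one pass over the points
def altCase1 (row col : Int) (pts : List (Int × Int)) : Bool :=
  match PySem.List.min? ((pts.filter (fun rc => decide (col < rc.2))).map (fun rc => rc.1)) (fun x => x) with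
  | none => false
  | some m => pts.any (fun rc => decide (rc.2 < col) && (decide (m < rc.1) && decide (rc.1 < row)))

-- new point as "2": minimum column among points right of col and above row, then one pass
def altCase2 (row col : Int) (pts : List (Int × Int)) : Bool :=
  match PySem.List.min? ((pts.filter (fun rc => decide (col < rc.2) && decide (row < rc.1))).map (fun rc => rc.2)) (fun x => x) with
  | none => false
  | some cm => pts.any (fun rc => decide (rc.1 < row) && decide (cm < rc.2))

-- prefix-minimum scan of the (c, -r)-sorted list (m = running minimum of r so far)
def scan3 : Option Int → List (Int × Int) → Bool
  | _, [] => false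
  | m, cnr :: rest =>
      let r := -cnr.2
      match m with
      | none => scan3 (some r) rest
      | some mv => if mv < r then true else scan3 (some (min mv r)) rest

-- new point as "3": sort points left of col and above row by (c, -r), scan with a prefix minimum
def altCase3 (row col : Int) (pts : List (Int × Int)) : Bool :=
  scan3 none (PySem.List.sorted2
    ((pts.filter (fun rc => decide (rc.2 < col) && decide (row < rc.1))).map (fun rc => (rc.2, -rc.1)))
    Prod.fst Prod.snd)

def new_point_allowed_alt (one_indices : List Int) (new_point_index : Int) (n : Int) : Bool :=
  let row := PySem.Int.floordiv new_point_index n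
  let col := PySem.Int.mod new_point_index n
  let pts := one_indices.map (fun v => (PySem.Int.floordiv v n, PySem.Int.mod v n))
  if altCase1 row col pts then false
  else if altCase2 row col pts then false
  else if altCase3 row col pts then false
  else true

-- ===== PRECONDITION & SPEC =====
-- Python raises ZeroDivisionError on n = 0 (new_point_index // n); both programs need n ≠ 0.
def Pre_new_point_allowed (one_indices : List Int) (new_point_index : Int) (n : Int) : Prop := n ≠ 0
instance (one_indices : List Int) (new_point_index : Int) (n : Int) : Decidable (Pre_new_point_allowed one_indices new_point_index n) := by unfold Pre_new_point_allowed; infer_instance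
def pvWitness_new_point_allowed : List Int × Int × Int := ([0, 5], 7, 3)
def Spec_new_point_allowed (one_indices : List Int) (new_point_index : Int) (n : Int) (out : Bool) : Prop := out = new_point_allowed_alt one_indices new_point_index n
instance (one_indices : List Int) (new_point_index : Int) (n : Int) (out : Bool) : Decidable (Spec_new_point_allowed one_indices new_point_index n out) := by unfold Spec_new_point_allowed; infer_instance

-- ===== CLAIM (what is proved, stated in full; the proofs are below) =====
def Claim_equal_new_point_allowed : Prop := ∀ (one_indices : List Int) (new_point_index : Int) (n : Int), Dom_new_point_allowed one_indices new_point_index n → Pre_new_point_allowed one_indices new_point_index n → Spec_new_point_allowed one_indices new_point_index n (new_point_allowed one_indices new_point_index n)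

-- ===== LEMMAS AND PROOFS =====

-- the three 312 cases, on (row, col) pairs a b with a the smaller-column point
def G1 (row col : Int) (a b : Int × Int) : Prop := b.1 < a.1 ∧ a.1 < row ∧ a.2 < col ∧ col < b.2
def G2 (row col : Int) (a b : Int × Int) : Prop := b.1 < row ∧ row < a.1 ∧ col < a.2 ∧ a.2 < b.2
def G3 (row col : Int) (a b : Int × Int) : Prop := row < a.1 ∧ a.1 < b.1 ∧ a.2 < b.2 ∧ b.2 < col
def G (row col : Int) (a b : Int × Int) : Prop := G1 row col a b ∨ G2 row col a b ∨ G3 row col a b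

lemma G_lt_col {row col : Int} {a b : Int × Int} (h : G row col a b) : a.2 < b.2 := by
  rcases h with h | h | h <;> simp only [G1, G2, G3] at h <;> omega

set_option maxHeartbeats 1000000 in
lemma badCore_iff (row col r1 c1 r2 c2 : Int) :
    npaBadCore row col r1 c1 r2 c2 = true ↔
      G row col (r1, c1) (r2, c2) ∨ G row col (r2, c2) (r1, c1) := by
  simp only [npaBadCore, npaCases, G, G1, G2, G3, Bool.or_eq_true, beq_iff_eq,
    Bool.and_eq_true, decide_eq_true_eq]
  split_ifs <;> simp_all <;> omega

-- [a, b] is a sublist of x :: l iff a = x and b ∈ l, or [a, b] is a sublist of l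
lemma pair_sublist_cons {α : Type} {a b x : α} {l : List α} :
    [a, b].Sublist (x :: l) ↔ (a = x ∧ b ∈ l) ∨ [a, b].Sublist l := by
  constructor
  · intro h
    cases h with
    | cons _ h => exact Or.inr h
    | cons₂ _ h => exact Or.inl ⟨rfl, (List.singleton_sublist).1 h⟩
  · rintro (⟨rfl, hb⟩ | h)
    · exact (List.cons_sublist_cons).2 ((List.singleton_sublist).2 hb)
    · exact h.cons x

-- two distinct members occur as a two-element sublist in one of the two orders
lemma pair_sublist_of_mem {α : Type} {a b : α} {l : List α}
    (ha : a ∈ l) (hb : b ∈ l) (hne : a ≠ b) :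
    [a, b].Sublist l ∨ [b, a].Sublist l := by
  induction l with
  | nil => cases ha
  | cons x l ih =>
    rcases List.mem_cons.1 ha with rfl | ha'
    · left; exact pair_sublist_cons.2 (Or.inl ⟨rfl, List.mem_cons.1 hb |>.resolve_left (by simpa using hne.symm) ⟩)
    · rcases List.mem_cons.1 hb with rfl | hb'
      · right; exact pair_sublist_cons.2 (Or.inl ⟨rfl, ha'⟩)
      · rcases ih ha' hb' with h | h
        · exact Or.inl (h.cons x)
        · exact Or.inr (h.cons x)

lemma inner_iff (n row col p : Int) (qs : List Int) :
    npaInner n row col p qs = true ↔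
      ∃ q ∈ qs, npaBadCore row col (PySem.Int.floordiv p n) (PySem.Int.mod p n)
        (PySem.Int.floordiv q n) (PySem.Int.mod q n) = true := by
  induction qs with
  | nil => simp [npaInner]
  | cons q qs ih =>
    simp only [npaInner]
    split_ifs with h
    · simp [h]
    · simp [ih, h]

lemma outer_iff (n row col : Int) (xs : List Int) :
    npaOuter n row col xs = true ↔
      ∃ a b : Int, [a, b].Sublist xs ∧
        npaBadCore row col (PySem.Int.floordiv a n) (PySem.Int.mod a n)
          (PySem.Int.floordiv b n) (PySem.Int.mod b n) = true := by
  induction xs with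
  | nil => simp [npaOuter]
  | cons x xs ih =>
    simp only [npaOuter]
    split_ifs with h
    · simp only [true_iff]
      rcases (inner_iff n row col x xs).1 h with ⟨q, hq, hbad⟩
      exact ⟨x, q, pair_sublist_cons.2 (Or.inl ⟨rfl, hq⟩), hbad⟩
    · rw [ih]
      constructor
      · rintro ⟨a, b, hs, hbad⟩; exact ⟨a, b, hs.cons x, hbad⟩
      · rintro ⟨a, b, hs, hbad⟩
        rcases pair_sublist_cons.1 hs with ⟨rfl, hb⟩ | hs'
        · exact absurd ((inner_iff n row col a xs).2 ⟨b, hb, hbad⟩) (by simpa using h)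
        · exact ⟨a, b, hs', hbad⟩

-- A's loop over pairs finds exactly a member pair in G
lemma outer_iff_G (n row col : Int) (xs : List Int) :
    npaOuter n row col xs = true ↔
      ∃ a ∈ xs.map (fun v => (PySem.Int.floordiv v n, PySem.Int.mod v n)),
      ∃ b ∈ xs.map (fun v => (PySem.Int.floordiv v n, PySem.Int.mod v n)),
        G row col a b := by
  rw [outer_iff]
  constructor
  · rintro ⟨a, b, hs, hbad⟩
    have hma : a ∈ xs := (hs.subset (by simp))
    have hmb : b ∈ xs := (hs.subset (by simp))
    rcases (badCore_iff _ _ _ _ _ _).1 hbad with h | h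
    · exact ⟨_, List.mem_map_of_mem hma, _, List.mem_map_of_mem hmb, h⟩
    · exact ⟨_, List.mem_map_of_mem hmb, _, List.mem_map_of_mem hma, h⟩
  · rintro ⟨pa, hpa, pb, hpb, hG⟩
    rcases List.mem_map.1 hpa with ⟨a, hma, rfl⟩
    rcases List.mem_map.1 hpb with ⟨b, hmb, rfl⟩
    by_cases hab : a = b
    · subst hab; exact absurd (G_lt_col hG) (by omega)
    · rcases pair_sublist_of_mem hma hmb hab with h | h
      · exact ⟨a, b, h, (badCore_iff _ _ _ _ _ _).2 (Or.inl hG)⟩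
      · exact ⟨b, a, h, (badCore_iff _ _ _ _ _ _).2 (Or.inr hG)⟩

lemma altCase1_iff (row col : Int) (pts : List (Int × Int)) :
    altCase1 row col pts = true ↔ ∃ a ∈ pts, ∃ b ∈ pts, G1 row col a b := by
  unfold altCase1 G1
  cases hmin : PySem.List.min? ((pts.filter (fun rc => decide (col < rc.2))).map (fun rc => rc.1)) (fun x => x) with
  | none =>
    rw [PySem.List.min?_eq_none_iff, List.map_eq_nil_iff, List.filter_eq_nil_iff] at hmin
    simp only [Bool.false_eq_true, false_iff]
    rintro ⟨a, ha, b, hb, hG⟩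
    exact hmin b hb (by simpa using hG.2.2.2)
  | some m =>
    have hm := PySem.List.min?_mem hmin
    have hmins := PySem.List.min?_isMin hmin
    rcases List.mem_map.1 hm with ⟨b0, hb0f, hb0⟩
    rcases List.mem_filter.1 hb0f with ⟨hb0p, hb0c⟩
    simp only [List.any_eq_true, Bool.and_eq_true, decide_eq_true_eq]
    constructor
    · rintro ⟨a, ha, h1, h2, h3⟩
      exact ⟨a, ha, b0, hb0p, by omega, h3, h1, by simpa using hb0c⟩
    · rintro ⟨a, ha, b, hb, hG1, hG2, hG3, hG4⟩
      have hmb : m ≤ b.1 :=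
        hmins b.1 (List.mem_map_of_mem (List.mem_filter.2 ⟨hb, by simpa using hG4⟩))
      exact ⟨a, ha, hG3, by omega, hG2⟩

lemma altCase2_iff (row col : Int) (pts : List (Int × Int)) :
    altCase2 row col pts = true ↔ ∃ a ∈ pts, ∃ b ∈ pts, G2 row col a b := by
  unfold altCase2 G2
  cases hmin : PySem.List.min? ((pts.filter (fun rc => decide (col < rc.2) && decide (row < rc.1))).map (fun rc => rc.2)) (fun x => x) with
  | none =>
    rw [PySem.List.min?_eq_none_iff, List.map_eq_nil_iff, List.filter_eq_nil_iff] at hmin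
    simp only [Bool.false_eq_true, false_iff]
    rintro ⟨a, ha, b, hb, hG⟩
    have := hmin a ha
    simp only [Bool.and_eq_true, decide_eq_true_eq] at this
    exact this ⟨hG.2.2.1, hG.2.1⟩
  | some cm =>
    have hm := PySem.List.min?_mem hmin
    have hmins := PySem.List.min?_isMin hmin
    rcases List.mem_map.1 hm with ⟨a0, ha0f, ha0⟩
    rcases List.mem_filter.1 ha0f with ⟨ha0p, ha0c⟩
    simp only [Bool.and_eq_true, decide_eq_true_eq] at ha0c
    simp only [List.any_eq_true, Bool.and_eq_true, decide_eq_true_eq]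
    constructor
    · rintro ⟨b, hb, h1, h2⟩
      exact ⟨a0, ha0p, b, hb, h1, ha0c.2, ha0c.1, by omega⟩
    · rintro ⟨a, ha, b, hb, hG1, hG2, hG3, hG4⟩
      have hmb : cm ≤ a.2 :=
        hmins a.2 (List.mem_map_of_mem (List.mem_filter.2 ⟨ha, by
          simp only [Bool.and_eq_true, decide_eq_true_eq]; exact ⟨by omega, hG2⟩⟩))
      exact ⟨b, hb, hG1, by omega⟩

-- the weak order named by Python's tuple comparison on (c, -r) pairs
def LexLe (u v : Int × Int) : Prop := u.1 < v.1 ∨ (u.1 = v.1 ∧ u.2 ≤ v.2)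

-- a pair of elements, in list order, whose r (= -snd) strictly rises
def Q (l : List (Int × Int)) : Prop := ∃ u v, [u, v].Sublist l ∧ -u.2 < -v.2

lemma Q_cons {x : Int × Int} {l : List (Int × Int)} :
    Q (x :: l) ↔ (∃ v ∈ l, -x.2 < -v.2) ∨ Q l := by
  unfold Q
  constructor
  · rintro ⟨u, v, hs, hlt⟩
    rcases pair_sublist_cons.1 hs with ⟨rfl, hv⟩ | hs'
    · exact Or.inl ⟨v, hv, hlt⟩
    · exact Or.inr ⟨u, v, hs', hlt⟩
  · rintro (⟨v, hv, hlt⟩ | ⟨u, v, hs, hlt⟩)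
    · exact ⟨x, v, pair_sublist_cons.2 (Or.inl ⟨rfl, hv⟩), hlt⟩
    · exact ⟨u, v, hs.cons x, hlt⟩

lemma scan3_some_iff (l : List (Int × Int)) : ∀ m : Int,
    scan3 (some m) l = true ↔ (∃ x ∈ l, m < -x.2) ∨ Q l := by
  induction l with
  | nil =>
    intro m
    simp only [scan3, List.not_mem_nil, false_and, exists_false, false_or, Q, Bool.false_eq_true, false_iff]
    rintro ⟨u, v, hs, -⟩
    exact absurd (List.eq_nil_of_sublist_nil hs) (by simp)
  | cons c rest ih =>
    intro m
    simp only [scan3]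
    rw [Q_cons]
    split_ifs with h
    · simp only [true_iff]
      exact Or.inl ⟨c, List.mem_cons_self .., h⟩
    · rw [ih]
      simp only [List.mem_cons, min_lt_iff]
      constructor
      · rintro (⟨x, hx, hm | hc⟩ | hQ)
        · exact Or.inl ⟨x, Or.inr hx, hm⟩
        · exact Or.inr (Or.inl ⟨x, hx, hc⟩)
        · exact Or.inr (Or.inr hQ)
      · rintro (⟨x, rfl | hx, hm⟩ | ⟨v, hv, hc⟩ | hQ)
        · omega
        · exact Or.inl ⟨x, hx, Or.inl hm⟩
        · exact Or.inl ⟨v, hv, Or.inr hc⟩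
        · exact Or.inr hQ

lemma scan3_none_iff (l : List (Int × Int)) : scan3 none l = true ↔ Q l := by
  cases l with
  | nil =>
    simp only [scan3, Q, Bool.false_eq_true, false_iff]
    rintro ⟨u, v, hs, -⟩
    exact absurd (List.eq_nil_of_sublist_nil hs) (by simp)
  | cons c rest =>
    show scan3 (some (-c.2)) rest = true ↔ Q (c :: rest)
    rw [scan3_some_iff, Q_cons]

lemma insertBy_lex_pairwise (x : Int × Int) (l : List (Int × Int))
    (h : l.Pairwise LexLe) :
    (PySem.List.insertBy
      (fun a b => decide (a.1 < b.1) || (!decide (b.1 < a.1) && decide (a.2 < b.2))) x l).Pairwise LexLe := by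
  induction l with
  | nil => simp [PySem.List.insertBy]
  | cons y ys ih =>
    rw [List.pairwise_cons] at h
    simp only [PySem.List.insertBy]
    split_ifs with hb
    · simp only [Bool.or_eq_true, Bool.and_eq_true, Bool.not_eq_eq_eq_not, Bool.not_true,
        decide_eq_true_eq, decide_eq_false_iff_not] at hb
      refine List.pairwise_cons.2 ⟨?_, List.pairwise_cons.2 ⟨h.1, h.2⟩⟩
      intro z hz
      rcases List.mem_cons.1 hz with rfl | hz'
      · unfold LexLe; omega
      · have := h.1 z hz'
        unfold LexLe at this ⊢; omega
    · simp only [Bool.or_eq_true, Bool.and_eq_true, Bool.not_eq_eq_eq_not, Bool.not_true,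
        decide_eq_true_eq, decide_eq_false_iff_not, not_or, not_and] at hb
      refine List.pairwise_cons.2 ⟨?_, ih h.2⟩
      intro z hz
      rcases (PySem.List.mem_insertBy _ _ _ _).1 hz with rfl | hz'
      · unfold LexLe; omega
      · exact h.1 z hz'

lemma sorted2_lex_pairwise (l : List (Int × Int)) :
    (PySem.List.sorted2 l Prod.fst Prod.snd false).Pairwise LexLe := by
  show (l.foldl (fun acc x => PySem.List.insertBy _ x acc) []).Pairwise LexLe
  have main : ∀ (l acc : List (Int × Int)), acc.Pairwise LexLe →
      (l.foldl (fun acc x => PySem.List.insertBy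
        (fun a b => decide (a.1 < b.1) || (!decide (b.1 < a.1) && decide (a.2 < b.2))) x acc) acc).Pairwise LexLe := by
    intro l
    induction l with
    | nil => intro acc h; exact h
    | cons x xs ih => intro acc h; exact ih _ (insertBy_lex_pairwise x acc h)
  exact main l [] List.Pairwise.nil

lemma Q_of_sorted_iff (l : List (Int × Int)) (hp : l.Pairwise LexLe) :
    Q l ↔ ∃ u ∈ l, ∃ v ∈ l, u.1 < v.1 ∧ -u.2 < -v.2 := by
  constructor
  · rintro ⟨u, v, hs, hlt⟩
    have hrel : LexLe u v := by
      have := (hp.sublist hs)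
      rcases List.pairwise_cons.1 this with ⟨h1, -⟩
      exact h1 v (by simp)
    refine ⟨u, hs.subset (by simp), v, hs.subset (by simp), ?_, hlt⟩
    unfold LexLe at hrel; omega
  · rintro ⟨u, hu, v, hv, hc, hr⟩
    have hne : u ≠ v := fun h => by rw [h] at hc; omega
    rcases pair_sublist_of_mem hu hv hne with hs | hs
    · exact ⟨u, v, hs, hr⟩
    · exfalso
      have := (hp.sublist hs)
      rcases List.pairwise_cons.1 this with ⟨h1, -⟩
      have := h1 u (by simp)
      unfold LexLe at this; omega

lemma altCase3_iff (row col : Int) (pts : List (Int × Int)) :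
    altCase3 row col pts = true ↔ ∃ a ∈ pts, ∃ b ∈ pts, G3 row col a b := by
  unfold altCase3 G3
  rw [scan3_none_iff,
    Q_of_sorted_iff _ (sorted2_lex_pairwise _)]
  have hmem : ∀ u, u ∈ PySem.List.sorted2
      ((pts.filter (fun rc => decide (rc.2 < col) && decide (row < rc.1))).map (fun rc => (rc.2, -rc.1)))
      Prod.fst Prod.snd false ↔
      ∃ a ∈ pts, a.2 < col ∧ row < a.1 ∧ u = (a.2, -a.1) := by
    intro u
    rw [(PySem.List.sorted2_perm _ _ _ _).mem_iff]
    simp only [List.mem_map, List.mem_filter, Bool.and_eq_true, decide_eq_true_eq]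
    constructor
    · rintro ⟨a, ⟨ha, h1, h2⟩, rfl⟩; exact ⟨a, ha, h1, h2, rfl⟩
    · rintro ⟨a, ha, h1, h2, rfl⟩; exact ⟨a, ⟨ha, h1, h2⟩, rfl⟩
  constructor
  · rintro ⟨u, hu, v, hv, hc, hr⟩
    rcases (hmem u).1 hu with ⟨a, ha, ha1, ha2, rfl⟩
    rcases (hmem v).1 hv with ⟨b, hb, hb1, hb2, rfl⟩
    exact ⟨a, ha, b, hb, ha2, by omega, by omega, hb1⟩
  · rintro ⟨a, ha, b, hb, hG1, hG2, hG3, hG4⟩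
    refine ⟨(a.2, -a.1), (hmem _).2 ⟨a, ha, by omega, hG1, rfl⟩,
            (b.2, -b.1), (hmem _).2 ⟨b, hb, hG4, by omega, rfl⟩, by omega, by omega⟩

-- ===== VERDICT (by name: the statement is the Claim_ definition above) =====
theorem new_point_allowed_spec : Claim_equal_new_point_allowed := by
  intro xs p n _ _
  unfold Spec_new_point_allowed
  dsimp only [new_point_allowed, new_point_allowed_alt]
  generalize (PySem.Int.floordiv p n) = row
  generalize (PySem.Int.mod p n) = col
  generalize hpts : xs.map (fun v => (PySem.Int.floordiv v n, PySem.Int.mod v n)) = pts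
  have ho := outer_iff_G n row col xs
  rw [hpts] at ho
  have key : npaOuter n row col xs = (altCase1 row col pts || (altCase2 row col pts || altCase3 row col pts)) := by
    rcases Bool.eq_false_or_eq_true (altCase1 row col pts || (altCase2 row col pts || altCase3 row col pts)) with h | h <;> rw [h]
    case inr =>
      simp only [Bool.or_eq_false_iff] at h
      cases hb : npaOuter n row col xs with
      | false => rfl
      | true =>
        rcases ho.1 hb with ⟨a, ha, b, hb', hG | hG | hG⟩
        · exact absurd ((altCase1_iff row col pts).2 ⟨a, ha, b, hb', hG⟩) (by simp [h.1])
        · exact absurd ((altCase2_iff row col pts).2 ⟨a, ha, b, hb', hG⟩) (by simp [h.2.1])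
        · exact absurd ((altCase3_iff row col pts).2 ⟨a, ha, b, hb', hG⟩) (by simp [h.2.2])
    case inl =>
      rw [ho]
      rcases (Bool.or_eq_true _ _).mp h with h1 | h23
      · rcases (altCase1_iff row col pts).1 h1 with ⟨a, ha, b, hb, hG⟩
        exact ⟨a, ha, b, hb, Or.inl hG⟩
      · rcases (Bool.or_eq_true _ _).mp h23 with h2 | h3
        · rcases (altCase2_iff row col pts).1 h2 with ⟨a, ha, b, hb, hG⟩
          exact ⟨a, ha, b, hb, Or.inr (Or.inl hG)⟩
        · rcases (altCase3_iff row col pts).1 h3 with ⟨a, ha, b, hb, hG⟩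
          exact ⟨a, ha, b, hb, Or.inr (Or.inr hG)⟩
  rw [key]
  rcases Bool.eq_false_or_eq_true (altCase1 row col pts) with h1 | h1 <;>
    rcases Bool.eq_false_or_eq_true (altCase2 row col pts) with h2 | h2 <;>
      rcases Bool.eq_false_or_eq_true (altCase3 row col pts) with h3 | h3 <;>
        simp [h1, h2, h3]
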